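-- pv_equiv track=rewrite | github.com/tvumcc/the-matrix-25 | art/encode.py | reachable_sums
-- ===== SOURCE A (Python) =====
-- def reachable_sums(basis: list[int], picks: int, max_val: int) -> set[int]:
--     """all values expressible as a sum of exactly `picks` values from basis.
--     since 0 is in basis, this is equivalent to sums of *at most* `picks` nonzero values.
--     """
--     current = {0}
--     for _ in range(picks):
--         nxt: set[int] = set()
--         for v in current:
--             for b in basis:
--                 s = v + b
--                 if s <= max_val:
--                     nxt.add(s)
--         current = nxt
--     return current
-- ===== SOURCE B (Python) =====
-- def reachable_sums(basis: list[int], picks: int, max_val: int) -> set[int]: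
--     """Single-pass worklist BFS over the product graph of states (value, step):
--     one queue with a global visited set of (value, step) pairs replaces A's
--     picks rounds of rebuilding whole generations; values are emitted when their
--     step count reaches picks."""
--     queue = [(0, 0)]
--     seen = {(0, 0)}
--     out: set[int] = set()
--     seen_add = seen.add
--     push = queue.append
--     i = 0
--     while i < len(queue):
--         v, k = queue[i]
--         i += 1
--         if k >= picks:
--             out.add(v)
--             continue
--         k1 = k + 1
--         for b in basis:
--             s = v + b
--             if s <= max_val:
--                 e = (s, k1)
--                 if e not in seen:
--                     seen_add(e)
--                     push(e)
--     return out
-- ===== Notes on version B (the rewrite author's own statement) =====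
-- stated objective: alternative
-- what changed: B replaces A's picks rounds of rebuilding whole generation sets with nested loops by a single-pass worklist BFS over (value, step) states: one queue, one global visited set of (value, step) pairs, values emitted as they are popped with step count picks.
import Mathlib
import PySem

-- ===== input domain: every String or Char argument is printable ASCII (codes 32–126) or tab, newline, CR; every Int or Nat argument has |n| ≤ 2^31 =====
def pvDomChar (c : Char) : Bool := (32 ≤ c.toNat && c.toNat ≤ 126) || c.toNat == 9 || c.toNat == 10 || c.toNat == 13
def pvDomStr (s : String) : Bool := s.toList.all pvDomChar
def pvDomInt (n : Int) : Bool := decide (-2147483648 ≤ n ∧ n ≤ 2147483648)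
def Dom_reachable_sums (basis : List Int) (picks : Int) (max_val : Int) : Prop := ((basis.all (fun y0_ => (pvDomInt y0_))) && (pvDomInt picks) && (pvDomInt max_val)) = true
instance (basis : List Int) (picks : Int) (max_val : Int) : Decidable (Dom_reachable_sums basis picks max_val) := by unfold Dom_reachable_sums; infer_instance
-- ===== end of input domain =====

-- B replaces A's picks rounds of rebuilding whole generations by a single-pass worklist BFS
-- over (value, step) states with one global visited set; an alternative traversal, same cost.


-- ===== PORT A =====
-- one round of A: nxt = set(); for v in current: for b in basis: s = v+b; if s <= max_val: nxt.add(s)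
def stepA (basis : List Int) (max_val : Int) (cur : List Int) : List Int :=
  cur.foldl (fun nxt v =>
    basis.foldl (fun nxt b =>
      let s := v + b
      if s ≤ max_val then PySem.Set.add nxt s else nxt) nxt) PySem.Set.empty

def reachable_sums (basis : List Int) (picks : Int) (max_val : Int) : List Int :=
  (PySem.List.pyRange 0 picks 1).foldl (fun cur _ => stepA basis max_val cur)
    (PySem.Set.ofList [0])

-- ===== PORT B =====
-- the inner 'for b in basis' of one popped state (v, k): tests s <= max_val and (s, k+1) not in
-- seen, then seen.add and queue.append; returns (new seen, entries appended to the queue)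
def discoverB (basis : List Int) (max_val : Int) (v : Int) (k : Int)
    (seen : List (Int × Int)) : List (Int × Int) × List (Int × Int) :=
  basis.foldl (fun p b =>
    let s := v + b
    if s ≤ max_val ∧ (s, k + 1) ∉ p.1 then (PySem.Set.add p.1 (s, k + 1), p.2 ++ [(s, k + 1)])
    else p) (seen, [])

-- shape facts the termination measure of the while loop needs (cited by decreasing_by)
theorem discoverB_shape (basis : List Int) (max_val v k : Int) (seen : List (Int × Int)) :
    (∀ e ∈ (discoverB basis max_val v k seen).2, e.2 = k + 1) ∧
      (discoverB basis max_val v k seen).2.length ≤ basis.length := by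
  unfold discoverB
  suffices h : ∀ (bs : List Int) (st : List (Int × Int) × List (Int × Int)),
      (∀ e ∈ st.2, e.2 = k + 1) →
      (∀ e ∈ (bs.foldl (fun p b =>
        if v + b ≤ max_val ∧ (v + b, k + 1) ∉ p.1 then (PySem.Set.add p.1 (v + b, k + 1), p.2 ++ [(v + b, k + 1)])
        else p) st).2, e.2 = k + 1) ∧
      (bs.foldl (fun p b =>
        if v + b ≤ max_val ∧ (v + b, k + 1) ∉ p.1 then (PySem.Set.add p.1 (v + b, k + 1), p.2 ++ [(v + b, k + 1)])
        else p) st).2.length ≤ st.2.length + bs.length by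
    simpa using h basis (seen, []) (by simp)
  intro bs
  induction bs with
  | nil => intro st h; simpa using h
  | cons b bs ih =>
      intro st h
      simp only [List.foldl_cons]
      by_cases hc : v + b ≤ max_val ∧ (v + b, k + 1) ∉ st.1
      · rw [if_pos hc]
        have := ih (PySem.Set.add st.1 (v + b, k + 1), st.2 ++ [(v + b, k + 1)])
          (by intro e he; rcases List.mem_append.1 he with h1 | h1
              · exact h e h1
              · simp at h1; simp [h1])
        refine ⟨this.1, ?_⟩
        have h2 := this.2
        simp at h2 ⊢
        omega
      · rw [if_neg hc]
        have := ih st h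
        exact ⟨this.1, by have h2 := this.2; simp only [List.length_cons]; omega⟩

-- the while loop: queue = processed ++ pending; appends go after pending
def loopB (basis : List Int) (picks : Int) (max_val : Int) :
    List (Int × Int) → List (Int × Int) → List Int → List Int
  | [], _seen, out => out
  | (v, k) :: rest, seen, out =>
      if k ≥ picks then
        loopB basis picks max_val rest seen (PySem.Set.add out v)
      else
        let p := discoverB basis max_val v k seen
        loopB basis picks max_val (rest ++ p.2) p.1 out
  termination_by pending _ _ => (pending.map (fun e => (basis.length + 1) ^ ((picks - e.2).toNat))).sum
  decreasing_by
  · simp only [List.map_cons, List.sum_cons]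
    have h1 : 0 < (basis.length + 1) ^ ((picks - k).toNat) := pow_pos (by omega) _
    omega
  · rename_i hk
    simp only [List.map_cons, List.sum_cons, List.map_append, List.sum_append]
    have hs := discoverB_shape basis max_val v k seen
    have hall : ∀ x ∈ (discoverB basis max_val v k seen).2.map
        (fun e => (basis.length + 1) ^ ((picks - e.2).toNat)),
        x = (basis.length + 1) ^ ((picks - (k + 1)).toNat) := by
      intro x hx
      rcases List.mem_map.1 hx with ⟨e, he, rfl⟩
      rw [hs.1 e he]
    have hsum : ((discoverB basis max_val v k seen).2.map
        (fun e => (basis.length + 1) ^ ((picks - e.2).toNat))).sum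
        = (discoverB basis max_val v k seen).2.length * (basis.length + 1) ^ ((picks - (k + 1)).toNat) := by
      rw [List.sum_eq_card_nsmul _ _ hall, List.length_map]; simp
    have hk' : (picks - k).toNat = (picks - (k + 1)).toNat + 1 := by omega
    have hb : (discoverB basis max_val v k seen).2.length * (basis.length + 1) ^ ((picks - (k + 1)).toNat)
        < (basis.length + 1) ^ ((picks - k).toNat) := by
      rw [hk', pow_succ]
      have h1 : 0 < (basis.length + 1) ^ ((picks - (k + 1)).toNat) := pow_pos (by omega) _
      have := hs.2
      nlinarith
    omega

def reachable_sums_alt (basis : List Int) (picks : Int) (max_val : Int) : List Int :=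
  loopB basis picks max_val [(0, 0)] (PySem.Set.ofList [(0, 0)]) PySem.Set.empty

-- ===== PRECONDITION & SPEC =====
def Spec_reachable_sums (basis : List Int) (picks : Int) (max_val : Int) (out : List Int) : Prop := out = reachable_sums_alt basis picks max_val
instance (basis : List Int) (picks : Int) (max_val : Int) (out : List Int) : Decidable (Spec_reachable_sums basis picks max_val out) := by unfold Spec_reachable_sums; infer_instance

-- ===== CLAIM (what is proved, stated in full; the proofs are below) =====
def Claim_equal_reachable_sums : Prop := ∀ (basis : List Int) (picks : Int) (max_val : Int), Dom_reachable_sums basis picks max_val → Spec_reachable_sums basis picks max_val (reachable_sums basis picks max_val)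

-- ===== LEMMAS AND PROOFS =====

-- the filtered shifts of one value v (children of v in the graph, in basis order)
def shiftsOf (basis : List Int) (max_val v : Int) : List Int :=
  (basis.map (fun b => v + b)).filter (fun s => s ≤ max_val)

-- one layer: ordered dedup of all children of the layer's states
def stepL (basis : List Int) (max_val : Int) (cur : List Int) : List Int :=
  PySem.Set.ofList (cur.flatMap (fun v => shiftsOf basis max_val v))

-- the layer sequence both programs compute
def Slayer (basis : List Int) (max_val : Int) : Nat → List Int
  | 0 => [0]
  | n + 1 => stepL basis max_val (Slayer basis max_val n)

theorem Slayer_nodup (basis : List Int) (max_val : Int) (n : Nat) :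
    (Slayer basis max_val n).Nodup := by
  cases n with
  | zero => simp [Slayer]
  | succ n => exact PySem.Set.nodup_ofList _

-- ===== A-side: the layered loop computes Slayer =====
theorem stepA_inner (max_val v : Int) (basis : List Int) (nxt : List Int) :
    basis.foldl (fun nxt b =>
      let s := v + b
      if s ≤ max_val then PySem.Set.add nxt s else nxt) nxt
    = PySem.Set.update nxt (shiftsOf basis max_val v) := by
  induction basis generalizing nxt with
  | nil => simp [PySem.Set.update, shiftsOf]
  | cons b bs ih =>
      simp only [List.foldl_cons, shiftsOf, List.map_cons, List.filter_cons]
      by_cases h : v + b ≤ max_val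
      · simp [h, ih, PySem.Set.update_cons, shiftsOf]
      · simp [h, ih, shiftsOf]

theorem foldl_update_flatMap (basis : List Int) (max_val : Int) (vs d : List Int) :
    vs.foldl (fun d v => PySem.Set.update d (shiftsOf basis max_val v)) d
      = PySem.Set.update d (vs.flatMap (fun v => shiftsOf basis max_val v)) := by
  induction vs generalizing d with
  | nil => simp [PySem.Set.update]
  | cons v vs ih => simp [List.foldl_cons, ih, PySem.Set.update_append]

theorem stepA_eq_stepL (basis : List Int) (max_val : Int) (cur : List Int) :
    stepA basis max_val cur = stepL basis max_val cur := by
  unfold stepA stepL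
  simp only [stepA_inner]
  rw [foldl_update_flatMap]
  exact PySem.Set.update_nil_left _

theorem foldl_const_iterate {α β : Type} (f : α → α) (l : List β) (x : α) :
    l.foldl (fun c _ => f c) x = f^[l.length] x := by
  induction l generalizing x with
  | nil => rfl
  | cons b bs ih => simp [List.foldl_cons, ih, Function.iterate_succ_apply]

theorem A_eq_Slayer (basis : List Int) (picks max_val : Int) :
    reachable_sums basis picks max_val = Slayer basis max_val picks.toNat := by
  unfold reachable_sums
  rw [foldl_const_iterate, PySem.List.length_pyRange_one,
      show ((picks - 0 : Int)) = picks by ring,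
      PySem.Set.ofList_eq_self_of_nodup _ (by decide : ([0] : List Int).Nodup)]
  generalize picks.toNat = n
  induction n with
  | zero => rfl
  | succ n ih =>
      rw [Function.iterate_succ_apply', ih, stepA_eq_stepL]
      rfl

-- ===== B-side =====
-- the new values one popped state contributes, in discovery order
def pvNews (max_val v : Int) : List Int → List Int → List Int
  | [], _d => []
  | b :: bs, d =>
      if v + b ≤ max_val ∧ v + b ∉ d then (v + b) :: pvNews max_val v bs (d ++ [v + b])
      else pvNews max_val v bs d

theorem mem_map_key {d : List Int} {s j : Int} :
    (s, j) ∈ d.map (fun x => (x, j)) ↔ s ∈ d := by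
  simp

theorem discoverB_go (basis : List Int) (max_val v k : Int)
    (seen0 : List (Int × Int)) (d acc : List Int)
    (h0 : ∀ s : Int, (s, k + 1) ∉ seen0) :
    basis.foldl (fun p b =>
      let s := v + b
      if s ≤ max_val ∧ (s, k + 1) ∉ p.1 then (PySem.Set.add p.1 (s, k + 1), p.2 ++ [(s, k + 1)])
      else p) (seen0 ++ d.map (fun s => (s, k + 1)), acc.map (fun s => (s, k + 1)))
    = (seen0 ++ (d ++ pvNews max_val v basis d).map (fun s => (s, k + 1)),
       (acc ++ pvNews max_val v basis d).map (fun s => (s, k + 1))) := by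
  induction basis generalizing d acc with
  | nil => simp [pvNews]
  | cons b bs ih =>
      simp only [List.foldl_cons]
      by_cases hd : v + b ≤ max_val ∧ v + b ∉ d
      · have hnm : (v + b, k + 1) ∉ seen0 ++ d.map (fun s => (s, k + 1)) := by
          rw [List.mem_append]; push Not
          exact ⟨h0 _, fun hc => hd.2 (mem_map_key.1 hc)⟩
        rw [if_pos ⟨hd.1, hnm⟩, PySem.Set.add_of_not_mem hnm]
        have e1 : (seen0 ++ d.map (fun s => (s, k + 1))) ++ [(v + b, k + 1)]
            = seen0 ++ (d ++ [v + b]).map (fun s => (s, k + 1)) := by simp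
        have e2 : acc.map (fun s => (s, k + 1)) ++ [(v + b, k + 1)]
            = (acc ++ [v + b]).map (fun s => (s, k + 1)) := by simp
        rw [e1, e2, ih (d ++ [v + b]) (acc ++ [v + b])]
        simp [pvNews, hd.1, hd.2]
      · have : ¬ (v + b ≤ max_val ∧ (v + b, k + 1) ∉ seen0 ++ d.map (fun s => (s, k + 1))) := by
          intro hc
          exact hd ⟨hc.1, fun hm => hc.2 (List.mem_append_right _ (mem_map_key.2 hm))⟩
        rw [if_neg this, ih d acc]
        have : pvNews max_val v (b :: bs) d = pvNews max_val v bs d := by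
          simp only [pvNews, if_neg hd]
        rw [this]

theorem discoverB_spec (basis : List Int) (max_val v k : Int)
    (seen0 : List (Int × Int)) (d : List Int)
    (h0 : ∀ s : Int, (s, k + 1) ∉ seen0) :
    discoverB basis max_val v k (seen0 ++ d.map (fun s => (s, k + 1)))
    = (seen0 ++ (d ++ pvNews max_val v basis d).map (fun s => (s, k + 1)),
       (pvNews max_val v basis d).map (fun s => (s, k + 1))) := by
  have := discoverB_go basis max_val v k seen0 d [] h0
  simpa [discoverB] using this

theorem pvNews_update (basis : List Int) (max_val v : Int) (d : List Int) :
    d ++ pvNews max_val v basis d = PySem.Set.update d (shiftsOf basis max_val v) := by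
  induction basis generalizing d with
  | nil => simp [pvNews, shiftsOf, PySem.Set.update]
  | cons b bs ih =>
      simp only [shiftsOf, List.map_cons, List.filter_cons]
      by_cases h1 : v + b ≤ max_val
      · simp only [h1, decide_true, if_true]
        rw [PySem.Set.update_cons]
        by_cases h2 : v + b ∈ d
        · rw [PySem.Set.add_of_mem h2]
          have : pvNews max_val v (b :: bs) d = pvNews max_val v bs d := by
            simp only [pvNews]; rw [if_neg (by tauto)]
          rw [this]; exact ih d
        · rw [PySem.Set.add_of_not_mem h2]
          have : pvNews max_val v (b :: bs) d = (v + b) :: pvNews max_val v bs (d ++ [v + b]) := by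
            simp only [pvNews]; rw [if_pos ⟨h1, h2⟩]
          rw [this]
          have := ih (d ++ [v + b])
          simpa using this
      · simp only [h1, decide_false, Bool.false_eq_true, if_false]
        have : pvNews max_val v (b :: bs) d = pvNews max_val v bs d := by
          simp only [pvNews]; rw [if_neg (by tauto)]
        rw [this]; exact ih d

-- processing a whole layer: pending = remaining layer-j entries ++ discovered layer-(j+1) entries
theorem block (basis : List Int) (picks max_val : Int) (j : Int) (hj : j < picks) :
    ∀ (vs d : List Int) (seen0 : List (Int × Int)) (out : List Int),
    (∀ s : Int, (s, j + 1) ∉ seen0) →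
    loopB basis picks max_val (vs.map (fun v => (v, j)) ++ d.map (fun s => (s, j + 1)))
        (seen0 ++ d.map (fun s => (s, j + 1))) out
    = loopB basis picks max_val
        ((PySem.Set.update d (vs.flatMap (fun v => shiftsOf basis max_val v))).map (fun s => (s, j + 1)))
        (seen0 ++ (PySem.Set.update d (vs.flatMap (fun v => shiftsOf basis max_val v))).map (fun s => (s, j + 1))) out := by
  intro vs
  induction vs with
  | nil => intro d seen0 out h0; simp [PySem.Set.update]
  | cons v vs ih =>
      intro d seen0 out h0
      rw [show ((v :: vs).map (fun v => (v, j)) ++ d.map (fun s => (s, j + 1)))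
          = (v, j) :: (vs.map (fun v => (v, j)) ++ d.map (fun s => (s, j + 1))) by simp]
      rw [loopB]
      rw [if_neg (by omega : ¬ j ≥ picks)]
      simp only []
      rw [discoverB_spec basis max_val v j seen0 d h0]
      have e1 : (vs.map (fun v => (v, j)) ++ d.map (fun s => (s, j + 1)))
          ++ (pvNews max_val v basis d).map (fun s => (s, j + 1))
          = vs.map (fun v => (v, j)) ++ (d ++ pvNews max_val v basis d).map (fun s => (s, j + 1)) := by
        simp
      rw [e1]
      rw [ih (d ++ pvNews max_val v basis d) seen0 out h0]
      rw [pvNews_update]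
      rw [show (v :: vs).flatMap (fun v => shiftsOf basis max_val v)
          = shiftsOf basis max_val v ++ vs.flatMap (fun v => shiftsOf basis max_val v) by simp]
      rw [PySem.Set.update_append]

-- the final layer: every entry has k ≥ picks, each pop appends its value to out
theorem drain (basis : List Int) (picks max_val : Int) (j : Int) (hj : j ≥ picks) :
    ∀ (vs : List Int) (seen : List (Int × Int)) (out : List Int),
    loopB basis picks max_val (vs.map (fun v => (v, j))) seen out
      = vs.foldl PySem.Set.add out := by
  intro vs
  induction vs with
  | nil => intro seen out; simp [loopB]
  | cons v vs ih =>
      intro seen out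
      simp only [List.map_cons]
      rw [loopB, if_pos hj]
      exact ih seen _

theorem main_loop (basis : List Int) (picks max_val : Int) :
    ∀ (r j : Nat) (seen : List (Int × Int)) (out : List Int),
    j + r = picks.toNat →
    (∀ e ∈ seen, e.2 ≤ (j : Int)) →
    loopB basis picks max_val ((Slayer basis max_val j).map (fun v => (v, (j : Int)))) seen out
      = (Slayer basis max_val picks.toNat).foldl PySem.Set.add out := by
  intro r
  induction r with
  | zero =>
      intro j seen out hj _
      have hjN : j = picks.toNat := by omega
      subst hjN
      rw [drain basis picks max_val _ (by omega)]
  | succ r ih =>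
      intro j seen out hj hs
      have hjp : (j : Int) < picks := by omega
      have h0 : ∀ s : Int, (s, (j : Int) + 1) ∉ seen := by
        intro s hc
        have h1 : ((j : Int) + 1) ≤ (j : Int) := hs _ hc
        omega
      have := block basis picks max_val (j : Int) hjp (Slayer basis max_val j) [] seen out h0
      simp only [List.map_nil, List.append_nil] at this
      rw [this]
      rw [PySem.Set.update_nil_left]
      have hcast : ((j : Int) + 1) = ((j + 1 : Nat) : Int) := by push_cast; ring
      rw [hcast]
      have hstep : PySem.Set.ofList ((Slayer basis max_val j).flatMap (fun v => shiftsOf basis max_val v))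
          = Slayer basis max_val (j + 1) := rfl
      rw [hstep]
      exact ih (j + 1) _ out (by omega)
        (by intro e he
            rcases List.mem_append.1 he with h1 | h1
            · have := hs _ h1; push_cast; omega
            · rcases List.mem_map.1 h1 with ⟨s, _, rfl⟩; simp)

theorem B_eq_Slayer (basis : List Int) (picks max_val : Int) :
    reachable_sums_alt basis picks max_val = Slayer basis max_val picks.toNat := by
  have h := main_loop basis picks max_val picks.toNat 0 [((0 : Int), (0 : Int))]
    PySem.Set.empty (by omega) (by intro e he; simp at he; simp [he])
  have h2 : ((Slayer basis max_val 0).map (fun v => (v, ((0 : Nat) : Int))))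
      = [((0 : Int), (0 : Int))] := by simp [Slayer]
  rw [h2] at h
  unfold reachable_sums_alt
  have h1 : (PySem.Set.ofList [((0 : Int), (0 : Int))]) = [((0 : Int), (0 : Int))] := by decide
  rw [h1, h]
  rw [show (PySem.Set.empty : List Int) = [] from rfl, ← PySem.Set.ofList_eq_foldl]
  exact PySem.Set.ofList_eq_self_of_nodup _ (Slayer_nodup basis max_val _)

-- ===== VERDICT (by name: the statement is the Claim_ definition above) =====
theorem reachable_sums_spec : Claim_equal_reachable_sums := by
  intro basis picks max_val _
  unfold Spec_reachable_sums
  rw [A_eq_Slayer, B_eq_Slayer]
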